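-- pv_equiv track=rewrite | github.com/Frogsdiary/dream-mecha | dream_mecha/core/systems/grid_system.py | shapes_overlap
-- ===== SOURCE A (Python) =====
-- from typing import Dict, List, Optional, Tuple, Any
--
-- def shapes_overlap(x1: int, y1: int, shape1: List[List[bool]],
--                   x2: int, y2: int, shape2: List[List[bool]]) -> bool:
--     """Check if two shapes overlap"""
--     # Simple overlap detection - can be optimized
--     for dy1, row1 in enumerate(shape1):
--         for dx1, cell1 in enumerate(row1):
--             if not cell1:
--                 continue
--
--             pos1_x, pos1_y = x1 + dx1, y1 + dy1
--
--             for dy2, row2 in enumerate(shape2):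
--                 for dx2, cell2 in enumerate(row2):
--                     if not cell2:
--                         continue
--
--                     pos2_x, pos2_y = x2 + dx2, y2 + dy2
--
--                     if pos1_x == pos2_x and pos1_y == pos2_y:
--                         return True
--
--     return False
-- ===== SOURCE B (Python) =====
-- from typing import List
--
-- def shapes_overlap(x1: int, y1: int, shape1: List[List[bool]],
--                    x2: int, y2: int, shape2: List[List[bool]]) -> bool:
--     """Check if two shapes overlap (scan only the geometric intersection region)"""
--     for y in range(max(y1, y2), min(y1 + len(shape1), y2 + len(shape2))):
--         row1 = shape1[y - y1]
--         row2 = shape2[y - y2]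
--         for x in range(max(x1, x2), min(x1 + len(row1), x2 + len(row2))):
--             if row1[x - x1] and row2[x - x2]:
--                 return True
--     return False
-- ===== Notes on version B (the rewrite author's own statement) =====
-- stated objective: faster
-- what changed: Replaced the all-pairs comparison of every set cell of shape1 with every set cell of shape2 by a direct traversal of the geometric intersection rectangle, testing both grids at each shared coordinate.
import Mathlib
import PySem

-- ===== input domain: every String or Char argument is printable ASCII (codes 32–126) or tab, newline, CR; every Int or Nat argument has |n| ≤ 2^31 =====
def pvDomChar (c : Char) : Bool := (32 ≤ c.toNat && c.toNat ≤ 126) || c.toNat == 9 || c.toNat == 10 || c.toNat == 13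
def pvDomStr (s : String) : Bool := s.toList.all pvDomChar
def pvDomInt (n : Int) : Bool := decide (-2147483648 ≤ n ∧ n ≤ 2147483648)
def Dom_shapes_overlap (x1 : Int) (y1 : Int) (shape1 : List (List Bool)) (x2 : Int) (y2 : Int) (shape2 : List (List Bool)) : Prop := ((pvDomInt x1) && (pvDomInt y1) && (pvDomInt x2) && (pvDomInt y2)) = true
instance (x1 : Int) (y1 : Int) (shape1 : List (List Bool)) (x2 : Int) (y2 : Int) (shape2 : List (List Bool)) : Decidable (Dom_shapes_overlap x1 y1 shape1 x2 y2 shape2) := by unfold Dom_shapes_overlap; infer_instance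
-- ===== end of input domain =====

-- B scans only the geometric intersection rectangle of the two grids instead of
-- comparing every set cell of shape1 with every set cell of shape2 (objective: faster).

-- ===== PORT A =====
-- the nested for-loops with early 'return True' become nested List.any over enumerate
def shapes_overlap (x1 : Int) (y1 : Int) (shape1 : List (List Bool)) (x2 : Int) (y2 : Int) (shape2 : List (List Bool)) : Bool :=
  (PySem.List.enumerate shape1 0).any (fun p1 =>
    (PySem.List.enumerate p1.2 0).any (fun q1 =>
      if !q1.2 then false else
        (PySem.List.enumerate shape2 0).any (fun p2 =>
          (PySem.List.enumerate p2.2 0).any (fun q2 =>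
            if !q2.2 then false else
              decide (x1 + q1.1 = x2 + q2.1) && decide (y1 + p1.1 = y2 + p2.1)))))

-- ===== PORT B =====
-- for y in range(max(y1,y2), min(...)) with early return → any over pyRange;
-- shape1[y - y1] etc. are in range by construction, ported with pyGetD (default never used)
def shapes_overlap_alt (x1 : Int) (y1 : Int) (shape1 : List (List Bool)) (x2 : Int) (y2 : Int) (shape2 : List (List Bool)) : Bool :=
  (PySem.List.pyRange (max y1 y2) (min (y1 + shape1.length) (y2 + shape2.length)) 1).any (fun y =>
    let row1 := PySem.List.pyGetD shape1 (y - y1) []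
    let row2 := PySem.List.pyGetD shape2 (y - y2) []
    (PySem.List.pyRange (max x1 x2) (min (x1 + row1.length) (x2 + row2.length)) 1).any (fun x =>
      PySem.List.pyGetD row1 (x - x1) false && PySem.List.pyGetD row2 (x - x2) false))

-- ===== PRECONDITION & SPEC =====
def Spec_shapes_overlap (x1 : Int) (y1 : Int) (shape1 : List (List Bool)) (x2 : Int) (y2 : Int) (shape2 : List (List Bool)) (out : Bool) : Prop := out = shapes_overlap_alt x1 y1 shape1 x2 y2 shape2
instance (x1 : Int) (y1 : Int) (shape1 : List (List Bool)) (x2 : Int) (y2 : Int) (shape2 : List (List Bool)) (out : Bool) : Decidable (Spec_shapes_overlap x1 y1 shape1 x2 y2 shape2 out) := by unfold Spec_shapes_overlap; infer_instance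

-- ===== CLAIM (what is proved, stated in full; the proofs are below) =====
def Claim_equal_shapes_overlap : Prop := ∀ (x1 : Int) (y1 : Int) (shape1 : List (List Bool)) (x2 : Int) (y2 : Int) (shape2 : List (List Bool)), Dom_shapes_overlap x1 y1 shape1 x2 y2 shape2 → Spec_shapes_overlap x1 y1 shape1 x2 y2 shape2 (shapes_overlap x1 y1 shape1 x2 y2 shape2)

-- ===== LEMMAS AND PROOFS =====

-- membership in PySem.List.enumerate, as an indexed existential
theorem pv_mem_enumerate {α : Type} (xs : List α) (s n : Int) (a : α) :
    (n, a) ∈ PySem.List.enumerate xs s ↔ ∃ k : Nat, xs[k]? = some a ∧ n = s + k := by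
  induction xs generalizing s with
  | nil => simp [PySem.List.enumerate_nil]
  | cons x xs ih =>
    rw [PySem.List.enumerate_cons]
    simp only [List.mem_cons, ih, Prod.mk.injEq]
    constructor
    · rintro (⟨hn, ha⟩ | ⟨k, hk, hn⟩)
      · exact ⟨0, by simp [ha.symm], by omega⟩
      · exact ⟨k + 1, by simpa using hk, by push_cast; omega⟩
    · rintro ⟨k, hk, hn⟩
      cases k with
      | zero => left; simp_all
      | succ k => right; exact ⟨k, by simpa using hk, by push_cast at hn ⊢; omega⟩

-- the common characterisation: an overlapping pair of set cells exists
def pvOverlapAt (x1 y1 : Int) (shape1 : List (List Bool)) (x2 y2 : Int) (shape2 : List (List Bool)) : Prop :=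
  ∃ (i j k l : Nat) (r1 r2 : List Bool),
    shape1[i]? = some r1 ∧ r1[j]? = some true ∧
    shape2[k]? = some r2 ∧ r2[l]? = some true ∧
    x1 + (j : Int) = x2 + (l : Int) ∧ y1 + (i : Int) = y2 + (k : Int)

theorem pv_A_iff (x1 y1 : Int) (shape1 : List (List Bool)) (x2 y2 : Int) (shape2 : List (List Bool)) :
    shapes_overlap x1 y1 shape1 x2 y2 shape2 = true ↔ pvOverlapAt x1 y1 shape1 x2 y2 shape2 := by
  have hif : ∀ (b X : Bool), (if b = false then false else X) = (b && X) := by decide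
  unfold shapes_overlap pvOverlapAt
  simp only [List.any_eq_true, Prod.exists, pv_mem_enumerate, Bool.not_eq_eq_eq_not,
    Bool.not_true, hif, Bool.and_eq_true, decide_eq_true_eq]
  constructor
  · rintro ⟨di, r1, ⟨i, hi, hdi⟩, dj, c1, ⟨j, hj, hdj⟩, hc1, dk, r2, ⟨k, hk, hdk⟩,
      dl, c2, ⟨l, hl, hdl⟩, hc2, hx, hy⟩
    subst hc1; subst hc2
    exact ⟨i, j, k, l, r1, r2, hi, hj, hk, hl, by omega, by omega⟩
  · rintro ⟨i, j, k, l, r1, r2, hi, hj, hk, hl, hx, hy⟩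
    exact ⟨(i : Int), r1, ⟨i, hi, by omega⟩, (j : Int), true, ⟨j, hj, by omega⟩, rfl,
      (k : Int), r2, ⟨k, hk, by omega⟩, (l : Int), true, ⟨l, hl, by omega⟩, rfl,
      by omega, by omega⟩

theorem pv_B_iff (x1 y1 : Int) (shape1 : List (List Bool)) (x2 y2 : Int) (shape2 : List (List Bool)) :
    shapes_overlap_alt x1 y1 shape1 x2 y2 shape2 = true ↔ pvOverlapAt x1 y1 shape1 x2 y2 shape2 := by
  unfold shapes_overlap_alt pvOverlapAt
  simp only [List.any_eq_true, PySem.List.mem_pyRange_one, Bool.and_eq_true]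
  constructor
  · rintro ⟨y, ⟨hylo, hyhi⟩, x, hxb, h1, h2⟩
    have hy1 : 0 ≤ y - y1 ∧ y - y1 < (shape1.length : Int) := by omega
    have hy2 : 0 ≤ y - y2 ∧ y - y2 < (shape2.length : Int) := by omega
    rw [PySem.List.pyGetD_eq_getElem shape1 [] hy1.1 hy1.2] at hxb h1
    rw [PySem.List.pyGetD_eq_getElem shape2 [] hy2.1 hy2.2] at hxb h2
    obtain ⟨hxlo, hxhi⟩ := hxb
    have hx1 : 0 ≤ x - x1 ∧ x - x1 < ((shape1[(y - y1).toNat]'(by omega)).length : Int) := by omega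
    have hx2 : 0 ≤ x - x2 ∧ x - x2 < ((shape2[(y - y2).toNat]'(by omega)).length : Int) := by omega
    rw [PySem.List.pyGetD_eq_getElem _ false hx1.1 hx1.2] at h1
    rw [PySem.List.pyGetD_eq_getElem _ false hx2.1 hx2.2] at h2
    refine ⟨(y - y1).toNat, (x - x1).toNat, (y - y2).toNat, (x - x2).toNat,
      shape1[(y - y1).toNat]'(by omega), shape2[(y - y2).toNat]'(by omega),
      List.getElem?_eq_getElem (by omega), ?_, List.getElem?_eq_getElem (by omega), ?_,
      by omega, by omega⟩
    · rw [List.getElem?_eq_getElem (by omega), h1]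
    · rw [List.getElem?_eq_getElem (by omega), h2]
  · rintro ⟨i, j, k, l, r1, r2, hi, hj, hk, hl, hx, hy⟩
    obtain ⟨hilen, hir⟩ := List.getElem?_eq_some_iff.mp hi
    obtain ⟨hjlen, hjr⟩ := List.getElem?_eq_some_iff.mp hj
    obtain ⟨hklen, hkr⟩ := List.getElem?_eq_some_iff.mp hk
    obtain ⟨hllen, hlr⟩ := List.getElem?_eq_some_iff.mp hl
    have e1 : PySem.List.pyGetD shape1 (y1 + (i : Int) - y1) [] = r1 := by
      rw [show y1 + (i : Int) - y1 = (i : Int) from by omega, PySem.List.pyGetD_natCast]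
      simp [List.getD_eq_getElem?_getD, hi]
    have e2 : PySem.List.pyGetD shape2 (y1 + (i : Int) - y2) [] = r2 := by
      rw [show y1 + (i : Int) - y2 = (k : Int) from by omega, PySem.List.pyGetD_natCast]
      simp [List.getD_eq_getElem?_getD, hk]
    refine ⟨y1 + (i : Int), ⟨by omega, by omega⟩, ?_⟩
    rw [e1, e2]
    refine ⟨x1 + (j : Int), ⟨by omega, by omega⟩, ?_, ?_⟩
    · rw [show x1 + (j : Int) - x1 = (j : Int) from by omega, PySem.List.pyGetD_natCast]
      simp [List.getD_eq_getElem?_getD, hj]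
    · rw [show x1 + (j : Int) - x2 = (l : Int) from by omega, PySem.List.pyGetD_natCast]
      simp [List.getD_eq_getElem?_getD, hl]

-- ===== VERDICT (by name: the statement is the Claim_ definition above) =====
theorem shapes_overlap_spec : Claim_equal_shapes_overlap := by
  intro x1 y1 shape1 x2 y2 shape2 _
  unfold Spec_shapes_overlap
  rw [Bool.eq_iff_iff, pv_A_iff, pv_B_iff]
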